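-- pv_equiv track=rewrite | github.com/ISACHAD/CHAD-CTF-April-2023 | Networking/EncodedSourDoughStarter/manifest_generator.py | container_location
-- ===== SOURCE A (Python) =====
-- def container_location(number, width, length):
--     curr = 0
--     curr_height = 0
--     curr_width = 0
--     curr_length = 0
--     while curr < number:
--         curr += 1
--         curr_width+=1
--         if(curr_width == width):
--             curr_width = 0
--             curr_length += 1
--         if(curr_length == length):
--             curr_length = 0
--             curr_height += 1
--
--     return {"height":curr_height, "width":curr_width, "length":curr_length}
-- ===== SOURCE B (Python) =====
-- def container_location(number, width, length):
--     n = max(number, 0)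
--     if width > 0:
--         w, q = n % width, n // width
--     else:
--         w, q = n, 0
--     if length > 0:
--         l, h = q % length, q // length
--     else:
--         l, h = q, 0
--     return {"height": h, "width": w, "length": l}
-- ===== Notes on version B (the rewrite author's own statement) =====
-- stated objective: faster
-- what changed: Replaces the step-by-step counting loop (one iteration per container index) with closed-form floor-division/modulo arithmetic on number, width and width-quotient.
-- intended difference: When number >= 1, length == 0 and width != 1, A's check ordering makes the height counter tick once per iteration while the length counter is still 0, so A returns height = min(number, width-1) (or number when width <= 0); B returns height = 0, the intended value for a degenerate zero-length dimension. — e.g. on container_location(3, 2, 0): A returns [("height", 1), ("width", 1), ("length", 1)], B returns [("height", 0), ("width", 1), ("length", 1)]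
import Mathlib
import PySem

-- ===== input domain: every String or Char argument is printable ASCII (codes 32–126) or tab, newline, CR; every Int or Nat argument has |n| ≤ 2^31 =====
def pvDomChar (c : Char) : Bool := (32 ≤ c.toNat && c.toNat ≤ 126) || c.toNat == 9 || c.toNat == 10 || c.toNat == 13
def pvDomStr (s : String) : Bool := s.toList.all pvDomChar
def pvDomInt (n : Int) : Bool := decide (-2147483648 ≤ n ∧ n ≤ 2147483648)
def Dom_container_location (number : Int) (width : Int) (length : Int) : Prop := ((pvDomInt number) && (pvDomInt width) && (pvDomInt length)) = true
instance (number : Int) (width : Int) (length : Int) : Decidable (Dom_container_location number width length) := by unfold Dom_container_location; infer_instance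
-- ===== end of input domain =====

-- ===== PORT A =====
-- Loop body of A: curr_width += 1; wrap at width (incrementing curr_length); wrap curr_length at length (incrementing curr_height). Fuel = number of loop iterations.
def pvALoop (width length : Int) : Nat → Int → Int → Int → Int × Int × Int
  | 0, cw, cl, ch => (ch, cw, cl)
  | Nat.succ f, cw, cl, ch =>
      let cw := cw + 1
      let p := if cw = width then ((0 : Int), cl + 1) else (cw, cl)
      let q := if p.2 = length then ((0 : Int), ch + 1) else (p.2, ch)
      pvALoop width length f p.1 q.1 q.2

def container_location (number : Int) (width : Int) (length : Int) : List (String × Int) :=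
  let r := pvALoop width length number.toNat 0 0 0
  [("height", r.1), ("width", r.2.1), ("length", r.2.2)]

-- ===== PORT B =====
def container_location_alt (number : Int) (width : Int) (length : Int) : List (String × Int) :=
  let n := max number 0
  let wq := if width > 0 then (PySem.Int.mod n width, PySem.Int.floordiv n width) else (n, (0 : Int))
  let lh := if length > 0 then (PySem.Int.mod wq.2 length, PySem.Int.floordiv wq.2 length) else (wq.2, (0 : Int))
  [("height", lh.2), ("width", wq.1), ("length", lh.1)]

-- ===== PRECONDITION & SPEC =====
-- When number >= 1, length == 0 and width != 1, A's check ordering ticks the height counter once per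
-- iteration while the length counter is still 0, so A returns a spurious positive height
-- (min(number, width-1), or number when width <= 0); B returns height = 0, the intended value for a
-- degenerate zero-length dimension.
def D_container_location (number : Int) (width : Int) (length : Int) : Prop :=
  1 ≤ number ∧ length = 0 ∧ width ≠ 1
instance (number : Int) (width : Int) (length : Int) : Decidable (D_container_location number width length) := by unfold D_container_location; infer_instance

def Spec_container_location (number : Int) (width : Int) (length : Int) (out : List (String × Int)) : Prop := ¬ D_container_location number width length → out = container_location_alt number width length
instance (number : Int) (width : Int) (length : Int) (out : List (String × Int)) : Decidable (Spec_container_location number width length out) := by unfold Spec_container_location; infer_instance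

def pvDiffWitness_container_location : Int × Int × Int := (3, 2, 0)
def pvDiffWitnessOut_container_location : (List (String × Int)) × (List (String × Int)) :=
  ([("height", 1), ("width", 1), ("length", 1)], [("height", 0), ("width", 1), ("length", 1)])

-- ===== CLAIM (what is proved, stated in full; the proofs are below) =====
def Claim_unchanged_container_location : Prop := ∀ (number : Int) (width : Int) (length : Int), Dom_container_location number width length → Spec_container_location number width length (container_location number width length)
def Claim_changed_container_location : Prop := Dom_container_location (pvDiffWitness_container_location.1) (pvDiffWitness_container_location.2.1) (pvDiffWitness_container_location.2.2) ∧ D_container_location (pvDiffWitness_container_location.1) (pvDiffWitness_container_location.2.1) (pvDiffWitness_container_location.2.2) ∧ container_location (pvDiffWitness_container_location.1) (pvDiffWitness_container_location.2.1) (pvDiffWitness_container_location.2.2) = pvDiffWitnessOut_container_location.1 ∧ container_location_alt (pvDiffWitness_container_location.1) (pvDiffWitness_container_location.2.1) (pvDiffWitness_container_location.2.2) = pvDiffWitnessOut_container_location.2 ∧ pvDiffWitnessOut_container_location.1 ≠ pvDiffWitnessOut_container_location.2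
def Claim_exact_container_location : Prop := ∀ (number : Int) (width : Int) (length : Int), Dom_container_location number width length → D_container_location number width length → container_location number width length ≠ container_location_alt number width length

-- ===== LEMMAS AND PROOFS =====

-- One unfolding step of A's loop, with the two wrap tests made explicit.
lemma pvALoop_succ (width length : Int) (m : Nat) (cw cl ch : Int) :
    pvALoop width length (m + 1) cw cl ch =
      if cw + 1 = width then
        (if cl + 1 = length then pvALoop width length m 0 0 (ch + 1)
         else pvALoop width length m 0 (cl + 1) ch)
      else
        (if cl = length then pvALoop width length m (cw + 1) 0 (ch + 1)
         else pvALoop width length m (cw + 1) cl ch) := by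
  by_cases h1 : cw + 1 = width
  · by_cases h2 : cl + 1 = length
    · simp [pvALoop, h1, h2]
    · simp [pvALoop, h1, h2]
  · by_cases h2 : cl = length
    · simp [pvALoop, h1, h2]
    · simp [pvALoop, h1, h2]

lemma pvDivShift (x c : Int) (hc : c ≠ 0) : (x + c) / c = x / c + 1 := by
  have h := Int.add_mul_ediv_left x 1 hc
  simp at h
  exact h

lemma pvModShift (x c : Int) : (x + c) % c = x % c := by
  have h := Int.add_mul_emod_self_left (a := x) (b := c) (c := 1)
  simpa using h

-- Regime width >= 1, length >= 1: closed form of the loop from an in-range state.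
lemma pvALoop_pos (width length : Int) (hw : 1 ≤ width) (hl : 1 ≤ length) :
    ∀ (n : Nat) (cw cl ch : Int), 0 ≤ cw → cw < width → 0 ≤ cl → cl < length →
      pvALoop width length n cw cl ch =
        (ch + (cl + (cw + n) / width) / length, (cw + n) % width, (cl + (cw + n) / width) % length) := by
  intro n
  induction n with
  | zero =>
      intro cw cl ch h1 h2 h3 h4
      simp only [pvALoop, Nat.cast_zero, add_zero]
      rw [Int.ediv_eq_zero_of_lt h1 h2, Int.emod_eq_of_lt h1 h2, add_zero,
        Int.ediv_eq_zero_of_lt h3 h4, Int.emod_eq_of_lt h3 h4, add_zero]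
  | succ m ih =>
      intro cw cl ch h1 h2 h3 h4
      rw [pvALoop_succ]
      push_cast
      by_cases hwrap : cw + 1 = width
      · rw [if_pos hwrap]
        have hc : cw + ((m : Int) + 1) = (m : Int) + width := by omega
        rw [hc, pvDivShift _ _ (by omega), pvModShift]
        by_cases hlw : cl + 1 = length
        · rw [if_pos hlw, ih 0 0 (ch + 1) le_rfl (by omega) le_rfl (by omega)]
          simp only [zero_add]
          have hc2 : cl + ((m : Int) / width + 1) = (m : Int) / width + length := by omega
          rw [hc2, pvDivShift _ _ (by omega), pvModShift]
          simp only [Prod.mk.injEq]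
          simp only [true_and, and_true]
          first | omega | ring
        · rw [if_neg hlw, ih 0 (cl + 1) ch le_rfl (by omega) (by omega) (by omega)]
          simp only [zero_add]
          have hc2 : cl + ((m : Int) / width + 1) = (cl + 1) + (m : Int) / width := by omega
          rw [hc2]
      · rw [if_neg hwrap, if_neg (by omega : ¬ cl = length),
          ih (cw + 1) cl ch (by omega) (by omega) h3 h4]
        have hc : cw + 1 + (m : Int) = cw + ((m : Int) + 1) := by omega
        rw [hc]

-- Regime width >= 1, length < 0: the length counter never wraps.
lemma pvALoop_negl (width length : Int) (hw : 1 ≤ width) (hl : length < 0) :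
    ∀ (n : Nat) (cw cl ch : Int), 0 ≤ cw → cw < width → 0 ≤ cl →
      pvALoop width length n cw cl ch = (ch, (cw + n) % width, cl + (cw + n) / width) := by
  intro n
  induction n with
  | zero =>
      intro cw cl ch h1 h2 h3
      simp only [pvALoop, Nat.cast_zero, add_zero]
      rw [Int.ediv_eq_zero_of_lt h1 h2, Int.emod_eq_of_lt h1 h2, add_zero]
  | succ m ih =>
      intro cw cl ch h1 h2 h3
      rw [pvALoop_succ]
      push_cast
      by_cases hwrap : cw + 1 = width
      · rw [if_pos hwrap, if_neg (by omega : ¬ cl + 1 = length),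
          ih 0 (cl + 1) ch le_rfl (by omega) (by omega)]
        simp only [zero_add]
        have hc : cw + ((m : Int) + 1) = (m : Int) + width := by omega
        rw [hc, pvDivShift _ _ (by omega), pvModShift]
        simp only [Prod.mk.injEq]
        simp only [true_and, and_true]
        first | omega | ring
      · rw [if_neg hwrap, if_neg (by omega : ¬ cl = length),
          ih (cw + 1) cl ch (by omega) (by omega) h3]
        have hc : cw + 1 + (m : Int) = cw + ((m : Int) + 1) := by omega
        rw [hc]

-- Regime width = 1, length = 0: every step wraps the width counter; height never ticks.
lemma pvALoop_w1_l0 :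
    ∀ (n : Nat) (cl ch : Int), 0 ≤ cl →
      pvALoop 1 0 n 0 cl ch = (ch, 0, cl + n) := by
  intro n
  induction n with
  | zero => intro cl ch h; simp [pvALoop]
  | succ m ih =>
      intro cl ch h
      rw [pvALoop_succ, if_pos (by norm_num : (0:Int) + 1 = 1),
        if_neg (by omega : ¬ cl + 1 = (0:Int)), ih (cl + 1) ch (by omega)]
      simp only [Prod.mk.injEq]
      simp only [true_and, and_true]
      first | omega | ring

-- Regime width <= 0, length ≠ 0: neither counter ever wraps.
lemma pvALoop_negw (width length : Int) (hw : width ≤ 0) (hl : length ≠ 0) :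
    ∀ (n : Nat) (cw ch : Int), 0 ≤ cw →
      pvALoop width length n cw 0 ch = (ch, cw + n, 0) := by
  intro n
  induction n with
  | zero => intro cw ch h; simp [pvALoop]
  | succ m ih =>
      intro cw ch h
      rw [pvALoop_succ, if_neg (by omega : ¬ cw + 1 = width),
        if_neg (fun hh => hl hh.symm), ih (cw + 1) ch (by omega)]
      simp only [Prod.mk.injEq]
      simp only [true_and, and_true]
      first | omega | ring

-- The height output is at least the incoming height counter (used for tightness).
lemma pvALoop_fst_ge (width length : Int) :
    ∀ (n : Nat) (cw cl ch : Int), ch ≤ (pvALoop width length n cw cl ch).1 := by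
  intro n
  induction n with
  | zero => intro cw cl ch; simp [pvALoop]
  | succ m ih =>
      intro cw cl ch
      rw [pvALoop_succ]
      split_ifs with h1 h2 h3
      · exact le_trans (by omega) (ih 0 0 (ch + 1))
      · exact ih 0 (cl + 1) ch
      · exact le_trans (by omega) (ih (cw + 1) 0 (ch + 1))
      · exact ih (cw + 1) cl ch

-- PySem floordiv/mod agree with Lean ediv/emod for a positive divisor.
lemma pysem_div_pos (a b : Int) (hb : 0 < b) : PySem.Int.floordiv a b = a / b :=
  PySem.Int.floordiv_eq_ediv_of_pos hb

lemma pysem_mod_pos (a b : Int) (hb : 0 < b) : PySem.Int.mod a b = a % b :=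
  PySem.Int.mod_eq_emod_of_pos hb

-- ===== VERDICT (by name: the statement is the Claim_ definition above) =====
theorem container_location_spec : Claim_unchanged_container_location := by
  intro number width length _
  unfold Spec_container_location
  intro hD
  simp only [container_location, container_location_alt]
  by_cases hn : 0 ≤ number
  case neg =>
    have h0 : number.toNat = 0 := Int.toNat_of_nonpos (by omega)
    have hm : max number 0 = 0 := by omega
    rw [h0, hm]
    simp only [pvALoop]
    split_ifs <;>
      simp [PySem.Int.mod, PySem.Int.floordiv, Int.zero_fmod, Int.zero_fdiv]
  case pos =>
  have hcast : ((number.toNat : Int)) = number := Int.toNat_of_nonneg hn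
  have hm : max number 0 = number := by omega
  rw [hm]
  by_cases hw : 1 ≤ width
  · rw [if_pos (by omega : width > 0)]
    by_cases hl : 1 ≤ length
    · rw [if_pos (by omega : length > 0),
        pvALoop_pos width length hw hl number.toNat 0 0 0 le_rfl (by omega) le_rfl (by omega),
        hcast]
      simp only [zero_add]
      rw [pysem_div_pos _ _ (by omega), pysem_mod_pos _ _ (by omega),
        pysem_div_pos _ _ (by omega), pysem_mod_pos _ _ (by omega)]
    · rw [if_neg (by omega : ¬ length > 0)]
      by_cases hneg : length < 0
      · rw [pvALoop_negl width length hw hneg number.toNat 0 0 0 le_rfl (by omega) le_rfl, hcast]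
        simp only [zero_add]
        rw [pysem_div_pos _ _ (by omega), pysem_mod_pos _ _ (by omega)]
      · have hl0 : length = 0 := by omega
        subst hl0
        by_cases hz : number = 0
        · subst hz
          simp [pvALoop, pysem_mod_pos _ _ (by omega : (0:Int) < width),
            pysem_div_pos _ _ (by omega : (0:Int) < width)]
        · have hw1 : width = 1 := by
            by_contra hne
            exact hD ⟨by omega, rfl, hne⟩
          subst hw1
          rw [pvALoop_w1_l0 number.toNat 0 0 le_rfl, hcast]
          rw [pysem_div_pos _ _ (by norm_num : (0:Int) < 1),
            pysem_mod_pos _ _ (by norm_num : (0:Int) < 1)]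
          simp
  · rw [if_neg (by omega : ¬ width > 0)]
    by_cases hl : length = 0
    · have hz : number = 0 := by
        by_contra hc
        exact hD ⟨by omega, hl, by omega⟩
      subst hz; subst hl
      simp [pvALoop]
    · rw [pvALoop_negw width length (by omega) hl number.toNat 0 0 le_rfl, hcast]
      simp only [zero_add]
      by_cases hpos : 0 < length
      · rw [if_pos hpos]
        rw [pysem_div_pos _ _ hpos, pysem_mod_pos _ _ hpos]
        simp
      · rw [if_neg (by omega : ¬ length > 0)]

theorem container_location_changed : Claim_changed_container_location := by
  unfold Claim_changed_container_location; decide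

theorem container_location_tight : Claim_exact_container_location := by
  intro number width length _ hD
  obtain ⟨hn, hl, hw⟩ := hD
  subst hl
  simp only [container_location, container_location_alt,
    (by norm_num : ¬ (0:Int) > 0), if_false]
  intro hEq
  simp only [List.cons.injEq, Prod.mk.injEq] at hEq
  have h1 : (pvALoop width 0 number.toNat 0 0 0).1 = 0 := hEq.1.2
  obtain ⟨m, hmeq⟩ : ∃ m, number.toNat = m + 1 :=
    ⟨number.toNat - 1, by omega⟩
  rw [hmeq, pvALoop_succ, if_neg (by omega : ¬ (0:Int) + 1 = width),
    if_pos rfl] at h1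
  have h2 := pvALoop_fst_ge width 0 m (0 + 1) 0 (0 + 1)
  omega
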